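-- pv_equiv track=rewrite | github.com/mhaw/speakloudtts | extractor.py | _find_matching_rule
-- ===== SOURCE A (Python) =====
-- def _find_matching_rule(url: str, domain: str, rules: list):
--     """Finds the best matching extraction rule for a given URL."""
--     for rule in rules:
--         if rule["pattern_type"] == "domain" and rule["pattern"] == domain:
--             return rule
--     for rule in rules:
--         if rule["pattern_type"] == "url_prefix" and url.startswith(rule["pattern"]):
--             return rule
--     return None
-- ===== SOURCE B (Python) =====
-- def _find_matching_rule(url: str, domain: str, rules: list):
--     """Score-and-select: collect every matching rule as (priority, position, rule)
--     -- priority 0 for a domain match, 1 for a url_prefix match -- then return the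
--     candidate with the smallest (priority, position) key, or None if there is none."""
--     candidates = []
--     for i, rule in enumerate(rules):
--         pt = rule.get("pattern_type")
--         if pt == "domain" and rule.get("pattern") == domain:
--             candidates.append((0, i, rule))
--         elif pt == "url_prefix":
--             p = rule.get("pattern")
--             if p is not None and url.startswith(p):
--                 candidates.append((1, i, rule))
--     if not candidates:
--         return None
--     return min(candidates, key=lambda t: (t[0], t[1]))[2]
-- ===== Notes on version B (the rewrite author's own statement) =====
-- stated objective: alternative
-- what changed: Replaces A's two staged early-return scans with a score-and-select algorithm: one enumerate pass collects every match as a (priority, position, rule) candidate and min over the lexicographic key picks the winner.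
import Mathlib
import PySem

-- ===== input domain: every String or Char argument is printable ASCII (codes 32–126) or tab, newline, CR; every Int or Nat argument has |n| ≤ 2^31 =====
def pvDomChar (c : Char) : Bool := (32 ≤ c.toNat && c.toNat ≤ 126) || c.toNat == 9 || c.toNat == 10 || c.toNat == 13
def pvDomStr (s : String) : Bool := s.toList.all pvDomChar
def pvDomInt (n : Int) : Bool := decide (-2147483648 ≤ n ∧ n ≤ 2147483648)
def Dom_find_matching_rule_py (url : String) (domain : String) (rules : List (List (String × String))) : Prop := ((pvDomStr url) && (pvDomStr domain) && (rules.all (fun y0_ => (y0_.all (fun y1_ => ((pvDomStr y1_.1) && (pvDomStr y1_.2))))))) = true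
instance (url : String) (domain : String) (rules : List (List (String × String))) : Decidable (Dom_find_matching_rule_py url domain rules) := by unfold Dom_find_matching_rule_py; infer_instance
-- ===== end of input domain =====

-- B replaces A's two staged early-return scans by a score-and-select pass (collect (priority, position, rule) candidates, take the lexicographic minimum); return values only.


-- ===== PORT A =====
-- rule[k] / rule.get(k) on the association-list encoding of a Python dict: first matching key
def pvGet (r : List (String × String)) (k : String) : Option String :=
  (r.find? (fun p => p.1 == k)).map (fun p => p.2)

-- A's first loop: return the first rule whose "pattern_type" is "domain" and whose "pattern" is the domain
def find_matching_rule_loop1 (domain : String) : List (List (String × String)) → Option (List (String × String))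
  | [] => none
  | rule :: rest =>
    if pvGet rule "pattern_type" == some "domain" && pvGet rule "pattern" == some domain
    then some rule else find_matching_rule_loop1 domain rest

-- A's second loop: return the first rule whose "pattern_type" is "url_prefix" and whose "pattern" is a prefix of url
def find_matching_rule_loop2 (url : String) : List (List (String × String)) → Option (List (String × String))
  | [] => none
  | rule :: rest =>
    if pvGet rule "pattern_type" == some "url_prefix" &&
       (match pvGet rule "pattern" with
        | some p => PySem.Str.startswith url p
        | none => false)
    then some rule else find_matching_rule_loop2 url rest

def find_matching_rule_py (url : String) (domain : String) (rules : List (List (String × String))) : Option (List (String × String)) :=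
  match find_matching_rule_loop1 domain rules with
  | some rule => some rule
  | none => find_matching_rule_loop2 url rules

-- ===== PORT B =====
-- Source B's collection loop: every match becomes a (priority, position, rule) candidate
def find_matching_rule_candidates (url : String) (domain : String) (rules : List (List (String × String))) : List (Int × Int × List (String × String)) :=
  (PySem.List.enumerate rules).foldl (fun candidates ir =>
    let pt := pvGet ir.2 "pattern_type"
    if pt == some "domain" && pvGet ir.2 "pattern" == some domain then
      candidates ++ [(0, ir.1, ir.2)]
    else if pt == some "url_prefix" then
      match pvGet ir.2 "pattern" with
      | some p => if PySem.Str.startswith url p then candidates ++ [(1, ir.1, ir.2)] else candidates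
      | none => candidates
    else candidates) []

def find_matching_rule_py_alt (url : String) (domain : String) (rules : List (List (String × String))) : Option (List (String × String)) :=
  let candidates := find_matching_rule_candidates url domain rules
  match PySem.List.min2? candidates (fun t => t.1) (fun t => t.2.1) with
  | some t => some t.2.2
  | none => none

-- ===== PRECONDITION & SPEC =====
-- per-rule shapes Pre_ is phrased with (dict lookups only; no port is referenced)
def pvDm (domain : String) (r : List (String × String)) : Bool :=
  pvGet r "pattern_type" == some "domain" && pvGet r "pattern" == some domain
def pvPm (url : String) (r : List (String × String)) : Bool :=
  pvGet r "pattern_type" == some "url_prefix" &&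
    (match pvGet r "pattern" with | some p => PySem.Str.startswith url p | none => false)
def pvBad1 (r : List (String × String)) : Bool :=
  pvGet r "pattern_type" == none ||
    (pvGet r "pattern_type" == some "domain" && pvGet r "pattern" == none)
def pvBad2 (r : List (String × String)) : Bool :=
  pvGet r "pattern_type" == some "url_prefix" && pvGet r "pattern" == none

-- preB is true exactly when Python A returns: a domain match occurs before any rule that would
-- make loop 1 raise KeyError, or loop 1 finishes cleanly and loop 2 matches (or finishes) before
-- any rule that would make it raise KeyError
def preB (url : String) (domain : String) (rules : List (List (String × String))) : Bool :=
  (rules.takeWhile (fun r => !pvBad1 r)).any (pvDm domain) ||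
  (rules.all (fun r => !pvBad1 r && !pvDm domain r) &&
    (rules.all (fun r => !pvBad2 r) || (rules.takeWhile (fun r => !pvBad2 r)).any (pvPm url)))

-- Pre_ excludes exactly the inputs on which Python A raises KeyError (a scanned rule missing
-- "pattern_type", or a "domain"/"url_prefix" rule missing "pattern", reached before A returns).
def Pre_find_matching_rule_py (url : String) (domain : String) (rules : List (List (String × String))) : Prop :=
  preB url domain rules = true
instance (url : String) (domain : String) (rules : List (List (String × String))) : Decidable (Pre_find_matching_rule_py url domain rules) := by unfold Pre_find_matching_rule_py; infer_instance

def pvWitness_find_matching_rule_py : String × String × (List (List (String × String))) :=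
  ("http://a/b", "a", [[("pattern_type", "url_prefix"), ("pattern", "http://a")], [("pattern_type", "domain"), ("pattern", "a")]])

def Spec_find_matching_rule_py (url : String) (domain : String) (rules : List (List (String × String))) (out : Option (List (String × String))) : Prop := out = find_matching_rule_py_alt url domain rules
instance (url : String) (domain : String) (rules : List (List (String × String))) (out : Option (List (String × String))) : Decidable (Spec_find_matching_rule_py url domain rules out) := by unfold Spec_find_matching_rule_py; infer_instance

-- ===== CLAIM (what is proved, stated in full; the proofs are below) =====
def Claim_equal_find_matching_rule_py : Prop := ∀ (url : String) (domain : String) (rules : List (List (String × String))), Dom_find_matching_rule_py url domain rules → Pre_find_matching_rule_py url domain rules → Spec_find_matching_rule_py url domain rules (find_matching_rule_py url domain rules)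


-- ===== LEMMAS AND PROOFS =====

-- "y is a strictly better candidate than x" under the lexicographic (priority, position) key
def pvBeats (y x : Int × Int × List (String × String)) : Bool :=
  decide (y.1 < x.1) || (!decide (x.1 < y.1) && decide (y.2.1 < x.2.1))

-- what one enumerated rule contributes to B's candidate list
def pvG (url domain : String) (ir : Int × List (String × String)) : List (Int × Int × List (String × String)) :=
  if pvDm domain ir.2 then [(0, ir.1, ir.2)]
  else if pvPm url ir.2 then [(1, ir.1, ir.2)]
  else []

lemma candidates_eq_flatMap (url domain : String) (rules : List (List (String × String))) :
    find_matching_rule_candidates url domain rules = (PySem.List.enumerate rules).flatMap (pvG url domain) := by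
  have hfun : (fun (candidates : List (Int × Int × List (String × String))) (ir : Int × List (String × String)) =>
      let pt := pvGet ir.2 "pattern_type"
      if pt == some "domain" && pvGet ir.2 "pattern" == some domain then
        candidates ++ [(0, ir.1, ir.2)]
      else if pt == some "url_prefix" then
        match pvGet ir.2 "pattern" with
        | some p => if PySem.Str.startswith url p then candidates ++ [(1, ir.1, ir.2)] else candidates
        | none => candidates
      else candidates)
      = (fun candidates ir => candidates ++ pvG url domain ir) := by
    funext candidates ir
    simp only [pvG, pvDm, pvPm]
    by_cases h1 : (pvGet ir.2 "pattern_type" == some "domain" && pvGet ir.2 "pattern" == some domain) = true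
    · simp [h1]
    · simp only [h1, if_false, Bool.false_eq_true]
      by_cases h2 : (pvGet ir.2 "pattern_type" == some "url_prefix") = true
      · rw [if_pos h2]
        have hm : ∀ (o : Option String),
            (match o with
              | some p => if PySem.Str.startswith url p then candidates ++ [(1, ir.1, ir.2)] else candidates
              | none => candidates) =
            candidates ++
              (if (pvGet ir.2 "pattern_type" == some "url_prefix" &&
                    match o with
                    | some p => PySem.Str.startswith url p
                    | none => false) = true then [(1, ir.1, ir.2)] else []) := by
          intro o
          have h2' : pvGet ir.2 "pattern_type" = some "url_prefix" := by simpa using h2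
          cases o with
          | none => simp
          | some p => cases hs : PySem.Chars.startswith url.toList p.toList <;> simp [hs, h2']
        exact hm (pvGet ir.2 "pattern")
      · simp [h2]
  rw [find_matching_rule_candidates, hfun, PySem.List.foldl_append_eq_flatMap]
  simp

lemma mem_cands (url domain : String) (rules : List (List (String × String))) (n : Int)
    (t : Int × Int × List (String × String))
    (ht : t ∈ (PySem.List.enumerate rules n).flatMap (pvG url domain)) :
    n ≤ t.2.1 ∧ (t.1 = 0 ∨ t.1 = 1) ∧ (t.1 = 0 → pvDm domain t.2.2 = true ∧ t.2.2 ∈ rules) := by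
  rcases List.mem_flatMap.1 ht with ⟨ir, hir, htg⟩
  rcases (PySem.List.mem_enumerate_iff _ _ _).1 hir with ⟨k, hk, rfl⟩
  have hmem : rules[k] ∈ rules := List.getElem_mem hk
  by_cases h1 : pvDm domain rules[k] = true
  · simp [pvG, h1] at htg
    subst htg
    refine ⟨by show n ≤ n + (k : Int); omega, Or.inl rfl, fun _ => ⟨h1, hmem⟩⟩
  · by_cases h2 : pvPm url rules[k] = true
    · simp [pvG, h1, h2] at htg
      subst htg
      exact ⟨by show n ≤ n + (k : Int); omega, Or.inr rfl, fun h => by simp at h⟩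
    · simp [pvG, h1, h2] at htg

-- the foldl kept by min2?: abstract over the fold function through the two equations hf / hf0
lemma fold_keep (f : Option (Int × Int × List (String × String)) → (Int × Int × List (String × String)) → Option (Int × Int × List (String × String)))
    (hf : ∀ m z, f (some m) z = if pvBeats z m then some z else some m)
    (x : Int × Int × List (String × String)) :
    ∀ t : List (Int × Int × List (String × String)), (∀ y ∈ t, pvBeats y x = false) → t.foldl f (some x) = some x := by
  intro t
  induction t with
  | nil => intro _; rfl
  | cons z t ih =>
    intro h
    have hz := h z (by simp)
    simp only [List.foldl_cons, hf, hz, Bool.false_eq_true, if_false]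
    exact ih (fun y hy => h y (by simp [hy]))

lemma fold_mem (f : Option (Int × Int × List (String × String)) → (Int × Int × List (String × String)) → Option (Int × Int × List (String × String)))
    (hf : ∀ m z, f (some m) z = if pvBeats z m then some z else some m)
    (hf0 : ∀ z, f none z = some z) :
    ∀ (t : List (Int × Int × List (String × String))) (acc : Option (Int × Int × List (String × String))) (m),
      t.foldl f acc = some m → m ∈ t ∨ acc = some m := by
  intro t
  induction t with
  | nil => intro acc m h; exact Or.inr h
  | cons z t ih =>
    intro acc m h
    simp only [List.foldl_cons] at h
    rcases ih (f acc z) m h with hm | hm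
    · exact Or.inl (by simp [hm])
    · cases acc with
      | none => rw [hf0] at hm; left; simp [← Option.some.inj hm]
      | some a =>
        rw [hf] at hm
        by_cases hb : pvBeats z a = true
        · rw [if_pos hb] at hm; left; simp [← Option.some.inj hm]
        · rw [if_neg hb] at hm; exact Or.inr hm

lemma beats_trans (y x z : Int × Int × List (String × String))
    (h1 : pvBeats y x = true) (h2 : pvBeats z x = false) : pvBeats y z = true := by
  simp only [pvBeats, Bool.or_eq_true, Bool.and_eq_true, Bool.not_eq_true', Bool.not_eq_false',
    decide_eq_true_iff, decide_eq_false_iff_not, Bool.or_eq_false_iff, Bool.and_eq_false_iff] at h1 h2 ⊢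
  omega

lemma fold_drop (f : Option (Int × Int × List (String × String)) → (Int × Int × List (String × String)) → Option (Int × Int × List (String × String)))
    (hf : ∀ m z, f (some m) z = if pvBeats z m then some z else some m)
    (hf0 : ∀ z, f none z = some z) :
    ∀ (t : List (Int × Int × List (String × String))) (x), (∃ y ∈ t, pvBeats y x = true) →
      t.foldl f (some x) = t.foldl f none := by
  intro t
  induction t with
  | nil => intro x h; simp at h
  | cons z t ih =>
    intro x h
    by_cases hb : pvBeats z x = true
    · simp only [List.foldl_cons, hf, hf0, hb, if_true]
    · rcases h with ⟨y, hy, hyx⟩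
      have hyt : y ∈ t := by
        rcases List.mem_cons.1 hy with rfl | h'
        · exact absurd hyx (by simp [hb])
        · exact h'
      simp only [List.foldl_cons, hf, hf0, hb, Bool.false_eq_true, if_false]
      rw [ih x ⟨y, hyt, hyx⟩, ih z ⟨y, hyt, beats_trans y x z hyx (by simpa using hb)⟩]

-- the foldl inside min2? with the lexicographic (priority, position) key
def pvF : Option (Int × Int × List (String × String)) → (Int × Int × List (String × String)) → Option (Int × Int × List (String × String)) :=
  fun acc x => match acc with
    | none => some x
    | some m => if pvBeats x m then some x else some m

lemma min2_eq_fold (xs : List (Int × Int × List (String × String))) :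
    PySem.List.min2? xs (fun t => t.1) (fun t => t.2.1) = xs.foldl pvF none := by
  unfold PySem.List.min2?
  apply PySem.List.foldl_congr_mem
  intro acc x _
  cases acc <;> rfl

lemma beats_eq_false_iff (y x : Int × Int × List (String × String)) :
    pvBeats y x = false ↔ x.1 ≤ y.1 ∧ (x.1 < y.1 ∨ x.2.1 ≤ y.2.1) := by
  simp only [pvBeats, Bool.or_eq_false_iff, Bool.and_eq_false_iff, Bool.not_eq_false',
    decide_eq_false_iff_not, decide_eq_true_iff]
  omega

lemma enum_cons (url domain : String) (r : List (String × String)) (rs : List (List (String × String))) (n : Int) :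
    (PySem.List.enumerate (r :: rs) n).flatMap (pvG url domain)
      = pvG url domain (n, r) ++ (PySem.List.enumerate rs (n + 1)).flatMap (pvG url domain) := by
  rw [PySem.List.enumerate_cons]
  simp

-- the heart of the equivalence: on candidates built from position n on, the lexicographic
-- minimum is the first domain match if any, else the first prefix match
lemma min2_cands (url domain : String) :
    ∀ (rules : List (List (String × String))) (n : Int),
      (match List.find? (pvDm domain) rules with
       | some r => ∃ i : Int, n ≤ i ∧
           PySem.List.min2? ((PySem.List.enumerate rules n).flatMap (pvG url domain)) (fun t => t.1) (fun t => t.2.1) = some (0, i, r)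
       | none =>
         match List.find? (pvPm url) rules with
         | some r => ∃ i : Int, n ≤ i ∧
             PySem.List.min2? ((PySem.List.enumerate rules n).flatMap (pvG url domain)) (fun t => t.1) (fun t => t.2.1) = some (1, i, r)
         | none => (PySem.List.enumerate rules n).flatMap (pvG url domain) = []) := by
  intro rules
  induction rules with
  | nil => intro n; simp [PySem.List.enumerate]
  | cons r rs ih =>
    intro n
    by_cases hdm : pvDm domain r = true
    · rw [List.find?_cons_of_pos hdm]
      refine ⟨n, le_refl n, ?_⟩
      rw [enum_cons]
      simp only [pvG, hdm, if_true]
      rw [min2_eq_fold, List.singleton_append, List.foldl_cons]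
      rw [show pvF none (0, n, r) = some (0, n, r) from rfl]
      apply fold_keep pvF (fun _ _ => rfl)
      intro y hy
      have hm := mem_cands url domain rs (n + 1) y hy
      rw [beats_eq_false_iff]
      rcases hm.2.1 with h | h <;> simp only [h] <;> constructor <;> omega
    · rw [List.find?_cons_of_neg hdm]
      by_cases hpm : pvPm url r = true
      · cases hfd : List.find? (pvDm domain) rs with
        | some r' =>
          have H := ih (n + 1); rw [hfd] at H
          obtain ⟨i, hi, hmin⟩ := H
          refine ⟨i, by omega, ?_⟩
          rw [enum_cons]
          simp only [pvG, hdm, hpm, Bool.false_eq_true, if_false, if_true]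
          rw [min2_eq_fold, List.singleton_append, List.foldl_cons]
          rw [show pvF none (1, n, r) = some (1, n, r) from rfl]
          rw [min2_eq_fold] at hmin
          have hmem : (0, i, r') ∈ (PySem.List.enumerate rs (n + 1)).flatMap (pvG url domain) := by
            rcases fold_mem pvF (fun _ _ => rfl) (fun _ => rfl) _ none _ hmin with h | h
            · exact h
            · simp at h
          rw [fold_drop pvF (fun _ _ => rfl) (fun _ => rfl) _ _ ⟨(0, i, r'), hmem, by simp [pvBeats]⟩]
          exact hmin
        | none =>
          rw [List.find?_cons_of_pos hpm]
          refine ⟨n, le_refl n, ?_⟩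
          rw [enum_cons]
          simp only [pvG, hdm, hpm, Bool.false_eq_true, if_false, if_true]
          rw [min2_eq_fold, List.singleton_append, List.foldl_cons]
          rw [show pvF none (1, n, r) = some (1, n, r) from rfl]
          apply fold_keep pvF (fun _ _ => rfl)
          intro y hy
          have hm := mem_cands url domain rs (n + 1) y hy
          have hno : ∀ a ∈ rs, ¬ pvDm domain a = true := by
            intro a ha
            exact List.find?_eq_none.1 hfd a ha
          have hy1 : y.1 = 1 := by
            rcases hm.2.1 with h | h
            · exact absurd (hm.2.2 h).1 (hno _ (hm.2.2 h).2)
            · exact h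
          have hn := hm.1
          rw [beats_eq_false_iff]
          exact ⟨by show (1 : Int) ≤ y.1; omega, Or.inr (by show n ≤ y.2.1; omega)⟩
      · rw [List.find?_cons_of_neg hpm]
        have H := ih (n + 1)
        rw [enum_cons]
        simp only [pvG, hdm, hpm, Bool.false_eq_true, if_false, List.nil_append]
        cases hfd : List.find? (pvDm domain) rs with
        | some r' =>
          rw [hfd] at H
          obtain ⟨i, hi, hmin⟩ := H
          exact ⟨i, by omega, hmin⟩
        | none =>
          rw [hfd] at H
          cases hfp : List.find? (pvPm url) rs with
          | some r' =>
            rw [hfp] at H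
            obtain ⟨i, hi, hmin⟩ := H
            exact ⟨i, by omega, hmin⟩
          | none =>
            rw [hfp] at H
            exact H

-- A's loops are first-match searches for the same per-rule shapes
lemma loop1_eq (domain : String) : ∀ rules, find_matching_rule_loop1 domain rules = List.find? (pvDm domain) rules
  | [] => rfl
  | r :: rs => by
    rw [find_matching_rule_loop1]
    cases h : pvDm domain r with
    | true =>
      have h' : (pvGet r "pattern_type" == some "domain" && pvGet r "pattern" == some domain) = true := h
      rw [if_pos h', List.find?_cons_of_pos h]
    | false =>
      have h' : ¬ (pvGet r "pattern_type" == some "domain" && pvGet r "pattern" == some domain) = true := by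
        simpa [pvDm] using h
      rw [if_neg h', List.find?_cons_of_neg (by simp [h]), loop1_eq domain rs]

lemma loop2_eq (url : String) : ∀ rules, find_matching_rule_loop2 url rules = List.find? (pvPm url) rules
  | [] => rfl
  | r :: rs => by
    rw [find_matching_rule_loop2]
    cases h : pvPm url r with
    | true =>
      have h' : (pvGet r "pattern_type" == some "url_prefix" &&
          (match pvGet r "pattern" with
           | some p => PySem.Str.startswith url p
           | none => false)) = true := h
      rw [if_pos h', List.find?_cons_of_pos h]
    | false =>
      have h' : ¬ (pvGet r "pattern_type" == some "url_prefix" &&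
          (match pvGet r "pattern" with
           | some p => PySem.Str.startswith url p
           | none => false)) = true := by
        intro hc
        exact absurd (show pvPm url r = true from hc) (by simp [h])
      rw [if_neg h', List.find?_cons_of_neg (by simp [h]), loop2_eq url rs]

-- ===== VERDICT (by name: the statement is the Claim_ definition above) =====
theorem find_matching_rule_py_spec : Claim_equal_find_matching_rule_py := by
  intro url domain rules _ _
  unfold Spec_find_matching_rule_py
  rw [show find_matching_rule_py_alt url domain rules =
      (match PySem.List.min2? (find_matching_rule_candidates url domain rules) (fun t => t.1) (fun t => t.2.1) with
       | some t => some t.2.2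
       | none => none) from rfl]
  rw [candidates_eq_flatMap]
  unfold find_matching_rule_py
  rw [loop1_eq, loop2_eq]
  have H := min2_cands url domain rules 0
  cases hfd : List.find? (pvDm domain) rules with
  | some r =>
    rw [hfd] at H
    obtain ⟨i, _, hmin⟩ := H
    rw [hmin]
  | none =>
    rw [hfd] at H
    cases hfp : List.find? (pvPm url) rules with
    | some r =>
      rw [hfp] at H
      obtain ⟨i, _, hmin⟩ := H
      rw [hmin]
    | none =>
      rw [hfp] at H
      rw [H]
      rfl
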